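-- pv_equiv track=rewrite | github.com/rexarski/biji-ben | uoft/CSC108/FINAL/final.summer_2009/block_string.py | block_string
-- ===== SOURCE A (Python) =====
-- def block_string(s, c):
--   '''s is a string, c is a one-character string. Return True exactly when
--   s consists entirely of increasing-length blocks of character c,
--   each followed by a space. For example, block_string ('a aa aaa ', 'a')
--   returns True, but block_string ('aa a aaa ', 'a') returns False.'''
--
--   all_good = True
--   block = 1
--   i = 0
--   while i < len(s) and all_good:
--     chunk = s[i:i+block + 1]
--     if chunk != c * block + ' ':
--       all_good = False
--     i = i + block + 1
--     block = block + 1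
--   return all_good
-- ===== SOURCE B (Python) =====
-- def block_string(s, c):
--     '''Recursive decomposition: the string is a valid block string iff it is
--     empty, or it starts with the current block followed by a space and the
--     rest (with the next block size) is valid in turn.'''
--     def ok(rest, block):
--         return rest == '' or (rest[:block + 1] == c * block + ' '
--                               and ok(rest[block + 1:], block + 1))
--     return ok(s, 1)
-- ===== Notes on version B (the rewrite author's own statement) =====
-- stated objective: simpler
-- what changed: B replaces A's while loop with its all_good flag, absolute index i and re-slicing of s by a short-circuiting recursion on the remaining suffix: empty means valid, otherwise the suffix must start with the current block plus a space and the rest must be valid with the next block size.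
import Mathlib
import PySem

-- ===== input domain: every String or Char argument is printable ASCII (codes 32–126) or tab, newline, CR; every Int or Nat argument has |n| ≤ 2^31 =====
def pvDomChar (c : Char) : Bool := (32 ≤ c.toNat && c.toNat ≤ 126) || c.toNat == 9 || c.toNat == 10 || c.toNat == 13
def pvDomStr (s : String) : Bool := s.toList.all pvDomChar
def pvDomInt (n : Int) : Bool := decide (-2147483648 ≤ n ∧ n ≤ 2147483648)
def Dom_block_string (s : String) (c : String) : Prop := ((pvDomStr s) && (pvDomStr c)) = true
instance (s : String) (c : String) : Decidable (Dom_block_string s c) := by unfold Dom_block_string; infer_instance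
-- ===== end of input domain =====

-- B replaces A's while loop (flag + absolute index) with a short-circuiting recursion on the remaining suffix (simpler; same cost).


-- ===== PORT A =====
-- A's while loop: state (all_good, block, i); chunk = s[i:i+block+1] via PySem slice, c * block via pyRepeat
def blockALoop (s : List Char) (c : List Char) (allGood : Bool) (block : Nat) (i : Nat) : Bool :=
  if h : i < s.length ∧ allGood = true then
    let chunk := PySem.List.slice s (some (i : Int)) (some ((i : Int) + (block : Int) + 1))
    let allGood' := if chunk ≠ PySem.List.pyRepeat c (block : Int) ++ [' '] then false else allGood
    blockALoop s c allGood' (block + 1) (i + block + 1)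
  else allGood
termination_by s.length - i
decreasing_by obtain ⟨h1, _⟩ := h; omega

def block_string (s : String) (c : String) : Bool :=
  blockALoop s.toList c.toList true 1 0

-- ===== PORT B =====
-- rest[block+1:] is exact via the PySem slice bridge lemma (cited by the termination proof of
-- bChk, hence stated before the port)
lemma slice_drop (rest : List Char) (block : Nat) :
    PySem.List.slice rest (some ((block : Int) + 1)) none = rest.drop (block + 1) := by
  have h : ((block : Int) + 1) = (((block + 1 : Nat)) : Int) := by push_cast; ring
  rw [h, PySem.List.slice_from_natCast]

-- B's helper ok(rest, block): Python's short-circuit `or`/`and` become the if-chain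
def bChk (c : List Char) (rest : List Char) (block : Nat) : Bool :=
  if rest = [] then true
  else if PySem.List.slice rest none (some ((block : Int) + 1))
      = PySem.List.pyRepeat c (block : Int) ++ [' '] then
    bChk c (PySem.List.slice rest (some ((block : Int) + 1)) none) (block + 1)
  else false
termination_by rest.length
decreasing_by
  rename_i hne _
  rw [slice_drop]
  have : 0 < rest.length := List.length_pos_iff.mpr hne
  simp only [List.length_drop]; omega

def block_string_alt (s : String) (c : String) : Bool :=
  bChk c.toList s.toList 1

-- ===== PRECONDITION & SPEC =====
def Spec_block_string (s : String) (c : String) (out : Bool) : Prop := out = block_string_alt s c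
instance (s : String) (c : String) (out : Bool) : Decidable (Spec_block_string s c out) := by unfold Spec_block_string; infer_instance

-- ===== CLAIM (what is proved, stated in full; the proofs are below) =====
def Claim_equal_block_string : Prop := ∀ (s : String) (c : String), Dom_block_string s c → Spec_block_string s c (block_string s c)

-- ===== LEMMAS AND PROOFS =====

-- rest[:block+1] is exact via the PySem slice bridge lemma
lemma slice_take (rest : List Char) (block : Nat) :
    PySem.List.slice rest none (some ((block : Int) + 1)) = rest.take (block + 1) := by
  have h : ((block : Int) + 1) = (((block + 1 : Nat)) : Int) := by push_cast; ring
  rw [h, PySem.List.slice_to_natCast]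


lemma blockALoop_false (s c : List Char) (block i : Nat) :
    blockALoop s c false block i = false := by
  rw [blockALoop.eq_def]; simp

-- A's loop from index i is B's recursion on the suffix s.drop i
lemma blockALoop_eq_bChk (c : List Char) (s : List Char) (block i : Nat) :
    blockALoop s c true block i = bChk c (s.drop i) block :=
  by
  by_cases hi : i < s.length
  · have hne : s.drop i ≠ [] := by
      simp only [ne_eq, List.drop_eq_nil_iff]; omega
    have hslice : PySem.List.slice s (some (i : Int)) (some ((i : Int) + (block : Int) + 1))
        = (s.drop i).take (block + 1) := by
      have harg : ((i : Int) + (block : Int) + 1) = (i : Int) + ((block + 1 : Nat) : Int) := by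
        push_cast; ring
      rw [harg, PySem.List.slice_natCast_add]
    rw [blockALoop.eq_def, dif_pos ⟨hi, rfl⟩]
    simp only [hslice, ne_eq]
    rw [bChk.eq_def, if_neg hne, slice_take, slice_drop]
    by_cases hchunk : (s.drop i).take (block + 1) = PySem.List.pyRepeat c (block : Int) ++ [' ']
    · simp only [hchunk, not_true_eq_false, if_false, if_true]
      rw [blockALoop_eq_bChk]
      have hdd : List.drop (block + 1) (List.drop i s) = List.drop (i + block + 1) s := by
        have harr : i + block + 1 = i + (block + 1) := by omega
        rw [harr, List.drop_drop]
      rw [hdd]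
    · simp only [hchunk, not_false_eq_true, if_true, if_false]
      rw [blockALoop_false]
  · rw [blockALoop.eq_def, dif_neg (by simp [hi])]
    have hd : s.drop i = [] := by simp only [List.drop_eq_nil_iff]; omega
    rw [hd, bChk.eq_def]; simp
termination_by s.length - i
decreasing_by omega

-- ===== VERDICT (by name: the statement is the Claim_ definition above) =====
theorem block_string_spec : Claim_equal_block_string := by
  intro s c _hdom
  unfold Spec_block_string block_string block_string_alt
  rw [blockALoop_eq_bChk, List.drop_zero]
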